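-- pv_equiv track=rewrite | github.com/drodda/advent_of_code | aoc_2015/challenge_03.py | follow_path
-- ===== SOURCE A (Python) =====
-- DIR_MAP = {
--     "^": (0, 1),
--     "v": (0, -1),
--     ">": (1, 0),
--     "<": (-1, 0),
-- }
--
-- def follow_path(path, start=(0, 0), include_start=True):
--     x, y = start
--     if include_start:
--         yield x, y
--     for step in path:
--         dx, dy = DIR_MAP[step]
--         x += dx
--         y += dy
--         yield x, y
-- ===== SOURCE B (Python) =====
-- DIR_MAP = {
--     "^": (0, 1),
--     "v": (0, -1),
--     ">": (1, 0),
--     "<": (-1, 0),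
-- }
--
--
-- def _prefix_sums(init, deltas):
--     """Running totals of deltas starting from init (init included)."""
--     out = [init]
--     for d in deltas:
--         out.append(out[-1] + d)
--     return out
--
--
-- def follow_path(path, start=(0, 0), include_start=True):
--     x0, y0 = start
--     steps = [DIR_MAP[c] for c in path]
--     xs = _prefix_sums(x0, [dx for dx, _ in steps])
--     ys = _prefix_sums(y0, [dy for _, dy in steps])
--     pts = list(zip(xs, ys))
--     if not include_start:
--         pts = pts[1:]
--     yield from pts
-- ===== Notes on version B (the rewrite author's own statement) =====
-- stated objective: alternative
-- what changed: Instead of A's single mutable (x,y) loop, B splits the problem per axis: it maps the path to two independent delta lists, materialises each axis' prefix-sum list separately, zips them into positions, and slices off the start when include_start is false.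
import Mathlib
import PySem

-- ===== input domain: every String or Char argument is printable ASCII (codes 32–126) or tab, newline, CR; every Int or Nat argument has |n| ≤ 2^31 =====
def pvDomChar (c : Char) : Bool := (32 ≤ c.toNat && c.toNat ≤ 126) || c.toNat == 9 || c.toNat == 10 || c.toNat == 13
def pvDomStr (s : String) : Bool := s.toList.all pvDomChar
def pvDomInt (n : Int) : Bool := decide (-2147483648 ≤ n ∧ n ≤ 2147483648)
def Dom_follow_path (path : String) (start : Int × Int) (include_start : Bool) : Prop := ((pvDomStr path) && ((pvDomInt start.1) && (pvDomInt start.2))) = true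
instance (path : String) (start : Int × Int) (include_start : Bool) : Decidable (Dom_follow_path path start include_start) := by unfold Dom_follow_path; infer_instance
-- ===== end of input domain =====

-- B replaces A's single mutable (x,y) loop by staged per-axis passes: two independent
-- prefix-sum lists (one per coordinate) zipped into positions (objective: alternative).

-- ===== PORT A =====
-- DIR_MAP as a Python dict (association list, insertion order)
def DIR_MAP : PySem.Dict Char (Int × Int) :=
  PySem.Dict.ofList [('^', ((0:Int), (1:Int))), ('v', (0, -1)), ('>', (1, 0)), ('<', (-1, 0))]

-- the 'for step in path' loop: yields (x+dx, y+dy) after each step; on a char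
-- not in DIR_MAP Python raises KeyError (excluded by Pre_), the port stops there
def follow_path_go : List Char → Int → Int → List (Int × Int)
  | [], _, _ => []
  | c :: cs, x, y =>
      match PySem.Dict.get? DIR_MAP c with
      | none => []  -- KeyError in Python; outside Pre_
      | some (dx, dy) => (x + dx, y + dy) :: follow_path_go cs (x + dx) (y + dy)

def follow_path (path : String) (start : Int × Int) (include_start : Bool) : List (Int × Int) :=
  (if include_start then [(start.1, start.2)] else []) ++ follow_path_go path.toList start.1 start.2

-- ===== PORT B =====
-- the loop of _prefix_sums: each appended element is last + d (out[-1] tracked as 'last')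
def pvPrefixGo : Int → List Int → List Int
  | _, [] => []
  | last, d :: ds => (last + d) :: pvPrefixGo (last + d) ds

-- _prefix_sums(init, deltas): out = [init]; for d in deltas: out.append(out[-1] + d)
def pvPrefixSums (init : Int) (deltas : List Int) : List Int :=
  init :: pvPrefixGo init deltas

def follow_path_alt (path : String) (start : Int × Int) (include_start : Bool) : List (Int × Int) :=
  -- steps = [DIR_MAP[c] for c in path]  (default never used inside Pre_)
  let steps := path.toList.map (fun c => (PySem.Dict.get? DIR_MAP c).getD (0, 0))
  let xs := pvPrefixSums start.1 (steps.map Prod.fst)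
  let ys := pvPrefixSums start.2 (steps.map Prod.snd)
  let pts := xs.zip ys
  if include_start then pts else pts.drop 1

-- ===== PRECONDITION & SPEC =====
-- Pre_ excludes exactly the paths containing a character outside DIR_MAP, on which
-- Python A (and B) raise KeyError.
def Pre_follow_path (path : String) (start : Int × Int) (include_start : Bool) : Prop :=
  path.toList.all (fun c => (PySem.Dict.get? DIR_MAP c).isSome) = true
instance (path : String) (start : Int × Int) (include_start : Bool) : Decidable (Pre_follow_path path start include_start) := by unfold Pre_follow_path; infer_instance
def pvWitness_follow_path : String × (Int × Int) × Bool := ("^>v<", (0, 0), true)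

def Spec_follow_path (path : String) (start : Int × Int) (include_start : Bool) (out : List (Int × Int)) : Prop := out = follow_path_alt path start include_start
instance (path : String) (start : Int × Int) (include_start : Bool) (out : List (Int × Int)) : Decidable (Spec_follow_path path start include_start out) := by unfold Spec_follow_path; infer_instance

-- ===== CLAIM (what is proved, stated in full; the proofs are below) =====
def Claim_equal_follow_path : Prop := ∀ (path : String) (start : Int × Int) (include_start : Bool), Dom_follow_path path start include_start → Pre_follow_path path start include_start → Spec_follow_path path start include_start (follow_path path start include_start)

-- ===== LEMMAS AND PROOFS =====
theorem zip_prefixGo_eq_go (cs : List Char) (x y : Int)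
    (h : ∀ c ∈ cs, (PySem.Dict.get? DIR_MAP c).isSome = true) :
    List.zip
      (pvPrefixGo x ((cs.map (fun c => (PySem.Dict.get? DIR_MAP c).getD (0, 0))).map Prod.fst))
      (pvPrefixGo y ((cs.map (fun c => (PySem.Dict.get? DIR_MAP c).getD (0, 0))).map Prod.snd))
      = follow_path_go cs x y := by
  induction cs generalizing x y with
  | nil => rfl
  | cons c cs ih =>
      have hc : (PySem.Dict.get? DIR_MAP c).isSome = true := h c (List.mem_cons_self ..)
      obtain ⟨⟨dx, dy⟩, hd⟩ := Option.isSome_iff_exists.mp hc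
      simp only [List.map, pvPrefixGo, follow_path_go, hd, Option.getD_some, List.zip_cons_cons]
      rw [ih _ _ (fun c hc => h c (List.mem_cons_of_mem _ hc))]

-- ===== VERDICT (by name: the statement is the Claim_ definition above) =====
theorem follow_path_spec : Claim_equal_follow_path := by
  intro path start inc _ hpre
  unfold Spec_follow_path follow_path follow_path_alt
  simp only [pvPrefixSums, List.zip_cons_cons,
    zip_prefixGo_eq_go path.toList start.1 start.2 (List.all_eq_true.mp hpre)]
  cases inc <;> simp
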